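-- pv_equiv track=rewrite | github.com/VladislavVO/PythonSeminar3 | task5.py | neg_fib
-- ===== SOURCE A (Python) =====
-- def neg_fib(number):
-- 	negative_fib = []
-- 	f1 = 1
-- 	f2 = -1
-- 	for i in range(number+1):
-- 		if i ==0: negative_fib.insert(i, f1)
-- 		elif i ==1: negative_fib.insert(i, f2)
-- 		else:
-- 			negative_fib.insert(i, f1-f2)
-- 			x=f2
-- 			f2=f1-f2
-- 			f1=x
-- 	return negative_fib
-- ===== SOURCE B (Python) =====
-- def neg_fib(number):
--     fibs = []
--     a, b = 1, 1
--     for _ in range(number + 1):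
--         fibs.append(a)
--         a, b = b, a + b
--     return [f if i % 2 == 0 else -f for i, f in enumerate(fibs)]
-- ===== Notes on version B (the rewrite author's own statement) =====
-- stated objective: simpler
-- what changed: A's single loop with signed pair state, the f1/f2 swap trick and list.insert is replaced by two distinct passes: build the plain positive Fibonacci magnitudes with the standard a,b=b,a+b recurrence, then apply alternating signs in a separate enumerate comprehension.
import Mathlib
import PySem

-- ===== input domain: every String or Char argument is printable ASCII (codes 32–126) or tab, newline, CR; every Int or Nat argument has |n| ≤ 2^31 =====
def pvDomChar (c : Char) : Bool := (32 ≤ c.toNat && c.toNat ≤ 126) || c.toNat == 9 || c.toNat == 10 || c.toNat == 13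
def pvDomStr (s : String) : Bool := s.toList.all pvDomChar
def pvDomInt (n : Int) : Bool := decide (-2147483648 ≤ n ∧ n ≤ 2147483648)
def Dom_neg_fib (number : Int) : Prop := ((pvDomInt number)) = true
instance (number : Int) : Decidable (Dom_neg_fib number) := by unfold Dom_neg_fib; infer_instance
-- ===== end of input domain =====

-- B replaces A's single signed-pair loop (insert + swap trick) by two distinct passes:
-- build positive Fibonacci magnitudes, then apply alternating signs via enumerate.


-- ===== PORT A =====
def neg_fib (number : Int) : List Int :=
  let st := (PySem.List.pyRange 0 (number + 1) 1).foldl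
    (fun (st : List Int × Int × Int) i =>
      let (lst, f1, f2) := st
      if i = 0 then (PySem.List.insert lst i f1, f1, f2)
      else if i = 1 then (PySem.List.insert lst i f2, f1, f2)
      else (PySem.List.insert lst i (f1 - f2), f2, f1 - f2))
    ([], 1, -1)
  st.1

-- ===== PORT B =====
def neg_fib_alt (number : Int) : List Int :=
  let st := (PySem.List.pyRange 0 (number + 1) 1).foldl
    (fun (st : List Int × Int × Int) _ =>
      let (fibs, a, b) := st
      (fibs ++ [a], b, a + b))
    ([], 1, 1)
  (PySem.List.enumerate st.1 0).map (fun p => if PySem.Int.mod p.1 2 = 0 then p.2 else -p.2)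

-- ===== PRECONDITION & SPEC =====
def Spec_neg_fib (number : Int) (out : List Int) : Prop := out = neg_fib_alt number
instance (number : Int) (out : List Int) : Decidable (Spec_neg_fib number out) := by unfold Spec_neg_fib; infer_instance

-- ===== CLAIM (what is proved, stated in full; the proofs are below) =====
def Claim_equal_neg_fib : Prop := ∀ (number : Int), Dom_neg_fib number → Spec_neg_fib number (neg_fib number)

-- ===== LEMMAS AND PROOFS =====

-- signed negafibonacci sequence 1, -1, 2, -3, 5, …
def sFib : Nat → Int
  | 0 => 1
  | 1 => -1
  | (k+2) => sFib k - sFib (k+1)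

-- plain Fibonacci magnitudes 1, 1, 2, 3, 5, …
def fb : Nat → Int
  | 0 => 1
  | 1 => 1
  | (k+2) => fb k + fb (k+1)

theorem sFib_eq_sign_fb (k : Nat) :
    sFib k = if k % 2 = 0 then fb k else -fb k := by
  induction k using Nat.twoStepInduction with
  | zero => decide
  | one => decide
  | more k ih1 ih2 =>
    rcases Nat.mod_two_eq_zero_or_one k with h | h
    · have hp : (k + 2) % 2 = 0 := by omega
      have hp1 : (k + 1) % 2 = 1 := by omega
      simp only [sFib, fb, ih1, ih2, hp, hp1, h, if_neg one_ne_zero]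
      split_ifs <;> ring
    · have hp : (k + 2) % 2 = 1 := by omega
      have hp1 : (k + 1) % 2 = 0 := by omega
      simp only [sFib, fb, ih1, ih2, hp, hp1, h, if_neg one_ne_zero]
      split_ifs <;> ring

theorem A_inv (m : Nat) :
    (List.range m).foldl
      (fun (st : List Int × Int × Int) (k : Nat) =>
        let (lst, f1, f2) := st
        if (k : Int) = 0 then (PySem.List.insert lst (k : Int) f1, f1, f2)
        else if (k : Int) = 1 then (PySem.List.insert lst (k : Int) f2, f1, f2)
        else (PySem.List.insert lst (k : Int) (f1 - f2), f2, f1 - f2))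
      ([], 1, -1)
    = ((List.range m).map sFib,
       (if m ≤ 1 then 1 else sFib (m - 2)),
       (if m ≤ 1 then -1 else sFib (m - 1))) := by
  induction m with
  | zero => decide
  | succ m ih =>
    rw [List.range_succ, List.foldl_append, ih]
    match m with
    | 0 => decide
    | 1 => decide
    | (n+2) =>
      have h0 : ((n + 2 : Nat) : Int) ≠ 0 := by omega
      have h1 : ((n + 2 : Nat) : Int) ≠ 1 := by omega
      have hlen : ((n + 2 : Nat) : Int) = ((((List.range (n+2)).map sFib).length : Nat) : Int) := by
        simp
      simp only [List.foldl_cons, List.foldl_nil, if_neg h0, if_neg h1]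
      rw [hlen, PySem.List.insert_natCast _ _ _ (le_refl _)]
      simp only [List.take_length, List.drop_length, List.range_succ, List.map_append,
        List.map_cons, List.map_nil]
      have hs : sFib (n + 2) = sFib n - sFib (n + 1) := rfl
      simp [hs]

theorem B_inv (m : Nat) :
    (List.range m).foldl
      (fun (st : List Int × Int × Int) (_ : Nat) =>
        let (fibs, a, b) := st
        (fibs ++ [a], b, a + b))
      ([], 1, 1)
    = ((List.range m).map fb, fb m, fb (m + 1)) := by
  induction m with
  | zero => decide
  | succ m ih =>
    rw [List.range_succ, List.foldl_append, ih]
    simp only [List.foldl_cons, List.foldl_nil, List.map_append,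
      List.map_cons, List.map_nil]
    rfl

theorem enumerate_map_range (g : Nat → Int) (m : Nat) :
    PySem.List.enumerate ((List.range m).map g) 0
      = (List.range m).map (fun (k : Nat) => ((k : Int), g k)) := by
  induction m with
  | zero => simp [PySem.List.enumerate_nil]
  | succ m ih =>
    rw [List.range_succ]
    simp only [List.map_append, List.map_cons, List.map_nil]
    rw [PySem.List.enumerate_append, ih]
    simp [PySem.List.enumerate_cons, PySem.List.enumerate_nil]

-- ===== VERDICT (by name: the statement is the Claim_ definition above) =====
theorem neg_fib_spec : Claim_equal_neg_fib := by
  intro number _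
  show neg_fib number = neg_fib_alt number
  unfold neg_fib neg_fib_alt
  rw [PySem.List.pyRange_one]
  simp only [sub_zero, List.foldl_map, zero_add]
  rw [A_inv, B_inv, enumerate_map_range]
  rw [List.map_map]
  apply List.map_congr_left
  intro k _
  simp only [Function.comp_apply]
  have hm : PySem.Int.mod ((k : Nat) : Int) 2 = ((k % 2 : Nat) : Int) := by
    exact_mod_cast PySem.Int.mod_natCast k 2
  rw [hm, sFib_eq_sign_fb k]
  rcases Nat.mod_two_eq_zero_or_one k with h | h <;> simp [h]
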